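-- pv_equiv track=rewrite | github.com/BackupTheBerlios/solipsis-svn | trunk/main/solipsis/services/profile/filter/data.py | create_regex
-- ===== SOURCE A (Python) =====
-- def create_regex(input_value):
--     """'input_input' is a keyword that main contain the joker char '*'.
--     Te function traduces it into a regex.
--
--     ie: *mp3 -> .*mp3
--         *.gif -> .*\.gif
--         bonus -> bonus
--         *any(FR)* -> .*any\(FR\).*"""
--     if input_value == "":
--         return input_value
--     # list of chars to replace (all except '*' and '\')
--     sensible_chars = ".^$+?{[]|()"
--     for sensible_char in sensible_chars:
--         input_value = input_value.replace(sensible_char, "\\" + sensible_char)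
--     # add regex expression
--     if not input_value.startswith('*'):
--         input_value = "^" + input_value
--     if not input_value.endswith('*'):
--         input_value += "$"
--     return input_value.replace('*', '.*')
-- ===== SOURCE B (Python) =====
-- def create_regex(input_value):
--     if input_value == "":
--         return input_value
--     parts = []
--     for ch in input_value:
--         if ch in ".^$+?{[]|()":
--             parts.append("\\" + ch)
--         elif ch == "*":
--             parts.append(".*")
--         else:
--             parts.append(ch)
--     prefix = "" if input_value.startswith("*") else "^"
--     suffix = "" if input_value.endswith("*") else "$"
--     return prefix + "".join(parts) + suffix
-- ===== Notes on version B (the rewrite author's own statement) =====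
-- stated objective: simpler
-- what changed: B builds the regex in one left-to-right scan that maps each character to its escaped or expanded form and derives the anchors from the original string's first and last characters, instead of A's eleven sequential full-string replace passes.
import Mathlib
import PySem

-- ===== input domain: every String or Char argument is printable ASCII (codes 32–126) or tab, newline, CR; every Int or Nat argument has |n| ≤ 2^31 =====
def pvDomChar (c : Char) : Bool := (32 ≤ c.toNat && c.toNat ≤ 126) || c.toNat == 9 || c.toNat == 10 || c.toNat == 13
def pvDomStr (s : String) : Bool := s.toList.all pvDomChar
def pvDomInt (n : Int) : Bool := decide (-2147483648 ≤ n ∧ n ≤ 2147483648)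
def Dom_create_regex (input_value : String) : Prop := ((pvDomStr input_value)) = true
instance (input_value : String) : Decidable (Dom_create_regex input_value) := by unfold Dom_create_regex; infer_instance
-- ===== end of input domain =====

-- B replaces A's ten full-string `.replace` passes by a single left-to-right scan that
-- escapes/expands each character once (objective: simpler one-pass construction).

-- ===== PORT A =====
-- A works on the string; the port works on its character list (PySem.Chars are the
-- Python-exact string primitives on List Char, as the prelude prescribes).
def create_regex (input_value : String) : String :=
  if input_value = "" then input_value
  else
    let l1 := (".^$+?{[]|()".toList).foldl
      (fun acc c => PySem.Chars.replace acc [c] ['\\', c]) input_value.toList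
    let l2 := if PySem.Chars.startswith l1 ['*'] then l1 else '^' :: l1
    let l3 := if PySem.Chars.endswith l2 ['*'] then l2 else l2 ++ ['$']
    String.ofList (PySem.Chars.replace l3 ['*'] ['.', '*'])

-- ===== PORT B =====
-- per-character translation used by B's single scan
def escChar (c : Char) : List Char :=
  if c ∈ ".^$+?{[]|()".toList then ['\\', c]
  else if c = '*' then ['.', '*']
  else [c]

def create_regex_alt (input_value : String) : String :=
  if input_value = "" then input_value
  else
    let l := input_value.toList
    let body := l.foldl (fun acc c => acc ++ escChar c) []
    let pre := if PySem.Chars.startswith l ['*'] then ([] : List Char) else ['^']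
    let suf := if PySem.Chars.endswith l ['*'] then ([] : List Char) else ['$']
    String.ofList (pre ++ body ++ suf)

-- ===== PRECONDITION & SPEC =====
def Spec_create_regex (input_value : String) (out : String) : Prop := out = create_regex_alt input_value
instance (input_value : String) (out : String) : Decidable (Spec_create_regex input_value out) := by unfold Spec_create_regex; infer_instance

-- ===== CLAIM (what is proved, stated in full; the proofs are below) =====
def Claim_equal_create_regex : Prop := ∀ (input_value : String), Dom_create_regex input_value → Spec_create_regex input_value (create_regex input_value)

-- ===== LEMMAS AND PROOFS =====

-- single-character `s.replace(c, new)` is a pointwise flatMap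
theorem replace_go_single (c : Char) (new : List Char) :
    ∀ (l : List Char) (fuel : Nat) (acc : List Char), l.length ≤ fuel →
      PySem.Chars.replace.go [c] new fuel l acc
        = acc.reverse ++ l.flatMap (fun ch => if ch = c then new else [ch]) := by
  intro l
  induction l with
  | nil =>
    intro fuel acc _
    cases fuel <;> simp [PySem.Chars.replace.go]
  | cons x t ih =>
    intro fuel acc h
    cases fuel with
    | zero => simp at h
    | succ n =>
      by_cases hx : x = c
      · subst hx
        rw [PySem.Chars.replace.go]
        simp only [List.isPrefixOf, BEq.rfl, Bool.true_and, if_true,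
          List.length_cons, List.drop_succ_cons, List.length_nil, List.drop_zero]
        rw [ih n (new.reverse ++ acc) (by simpa using h)]
        simp
      · rw [PySem.Chars.replace.go]
        simp only [List.isPrefixOf, Bool.and_true]
        rw [if_neg (by simp [beq_iff_eq]; exact fun h' => hx h'.symm)]
        rw [ih n (x :: acc) (by simpa using h)]
        simp [hx]

theorem replace_single (l : List Char) (c : Char) (new : List Char) :
    PySem.Chars.replace l [c] new
      = l.flatMap (fun ch => if ch = c then new else [ch]) := by
  simpa [PySem.Chars.replace] using replace_go_single c new l l.length [] le_rfl

-- escaping with respect to a set S of already-handled characters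
def escL (S : List Char) (c : Char) : List Char := if c ∈ S then ['\\', c] else [c]

theorem escL_step (S : List Char) (d : Char) (hd : d ∉ S) (hb : d ≠ '\\') (l : List Char) :
    PySem.Chars.replace (l.flatMap (escL S)) [d] ['\\', d]
      = l.flatMap (escL (S ++ [d])) := by
  rw [replace_single, List.flatMap_assoc]
  apply congrArg l.flatMap
  funext c
  by_cases hc : c ∈ S
  · have hcd : c ≠ d := fun h => hd (h ▸ hc)
    have h1 : ¬('\\' = d) := fun h => hb h.symm
    simp [escL, hc, hcd, h1]
  · by_cases hcd : c = d
    · subst hcd; simp [escL, hc]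
    · simp [escL, hc, hcd]

theorem fold_replace (cs : List Char) :
    ∀ (S : List Char) (l : List Char), (∀ d ∈ cs, d ∉ S) → cs.Nodup → '\\' ∉ cs →
      cs.foldl (fun acc c => PySem.Chars.replace acc [c] ['\\', c]) (l.flatMap (escL S))
        = l.flatMap (escL (S ++ cs)) := by
  induction cs with
  | nil => intro S l _ _ _; simp
  | cons d cs' ih =>
    intro S l h hnd hb
    simp only [List.foldl_cons]
    rw [escL_step S d (h d (by simp)) (fun h' => hb (h' ▸ by simp)) l]
    rw [ih (S ++ [d]) l
      (fun e he => by
        simp only [List.mem_append, List.mem_singleton]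
        rintro (h1 | h2)
        · exact h e (by simp [he]) h1
        · exact (List.nodup_cons.mp hnd).1 (h2 ▸ he))
      (List.nodup_cons.mp hnd).2
      (fun h' => hb (by simp [h']))]
    simp

-- last character of the escaped list is the last character of the input
theorem getLast?_flatMap_escL (S : List Char) (l : List Char) :
    (l.flatMap (escL S)).getLast? = l.getLast? := by
  induction l using List.reverseRecOn with
  | nil => simp
  | append_singleton init c _ =>
    rw [List.flatMap_append]
    by_cases hc : c ∈ S <;>
      simp [escL, hc]

theorem endswith_singleton (a : Char) (s : List Char) :
    PySem.Chars.endswith s [a] = (s.getLast? == some a) := by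
  show [a].isPrefixOf s.reverse = _
  rw [← List.head?_reverse]
  cases s.reverse <;> simp [List.isPrefixOf, eq_comm]

theorem sens_nodup : (".^$+?{[]|()".toList).Nodup := by decide

theorem escaped_eq (l : List Char) :
    (".^$+?{[]|()".toList).foldl
        (fun acc c => PySem.Chars.replace acc [c] ['\\', c]) l
      = l.flatMap (escL (".^$+?{[]|()".toList)) := by
  have h0 : l.flatMap (escL []) = l := by
    induction l with
    | nil => rfl
    | cons c t ih => simp [escL, ih]
  calc (".^$+?{[]|()".toList).foldl (fun acc c => PySem.Chars.replace acc [c] ['\\', c]) l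
      = (".^$+?{[]|()".toList).foldl (fun acc c => PySem.Chars.replace acc [c] ['\\', c])
          (l.flatMap (escL [])) := by rw [h0]
    _ = l.flatMap (escL ([] ++ ".^$+?{[]|()".toList)) := by
          exact fold_replace _ [] l (by intro d _; simp) sens_nodup (by decide)
    _ = _ := by simp

-- star expansion of an escaped list is B's per-character translation
theorem star_expand (l : List Char) :
    (l.flatMap (escL (".^$+?{[]|()".toList))).flatMap
        (fun ch => if ch = '*' then ['.', '*'] else [ch])
      = l.flatMap escChar := by
  rw [List.flatMap_assoc]
  apply congrArg l.flatMap
  funext c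
  by_cases hc : c ∈ ".^$+?{[]|()".toList
  · have hcs : c ≠ '*' := by intro h; subst h; exact absurd hc (by decide)
    unfold escL escChar
    rw [if_pos hc, if_pos hc]
    simp [hcs]
  · by_cases hcs : c = '*'
    · subst hcs
      unfold escL escChar
      rw [if_neg hc, if_neg hc]
      simp
    · unfold escL escChar
      rw [if_neg hc, if_neg hc]
      simp [hcs]

theorem startswith_flatMap (l : List Char) (hne : l ≠ []) :
    PySem.Chars.startswith (l.flatMap (escL (".^$+?{[]|()".toList))) ['*']
      = PySem.Chars.startswith l ['*'] := by
  cases l with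
  | nil => exact absurd rfl hne
  | cons c t =>
    by_cases hc : c ∈ ".^$+?{[]|()".toList
    · have hcs : c ≠ '*' := by intro h; subst h; exact absurd hc (by decide)
      have h1 : escL (".^$+?{[]|()".toList) c = ['\\', c] := by
        unfold escL; rw [if_pos hc]
      show ['*'].isPrefixOf _ = ['*'].isPrefixOf _
      rw [List.flatMap_cons, h1]
      simp [List.isPrefixOf, beq_eq_false_iff_ne, Ne.symm hcs]
    · have h1 : escL (".^$+?{[]|()".toList) c = [c] := by
        unfold escL; rw [if_neg hc]
      show ['*'].isPrefixOf _ = ['*'].isPrefixOf _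
      rw [List.flatMap_cons, h1]
      simp [List.isPrefixOf]

theorem flatMap_escL_ne_nil (l : List Char) (hne : l ≠ []) :
    l.flatMap (escL (".^$+?{[]|()".toList)) ≠ [] := by
  intro h
  have := getLast?_flatMap_escL (".^$+?{[]|()".toList) l
  rw [h] at this
  simp at this
  exact hne (by simpa using this.symm)

theorem main_eq (l : List Char) (hne : l ≠ []) :
    create_regex (String.ofList l) = create_regex_alt (String.ofList l) := by
  have hs : String.ofList l ≠ "" := by
    intro he; apply hne; have := congrArg String.toList he; simpa using this
  unfold create_regex create_regex_alt
  rw [if_neg hs, if_neg hs]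
  simp only [String.toList_ofList]
  rw [escaped_eq, PySem.List.foldl_append_eq_flatMap, List.nil_append]
  set S := ".^$+?{[]|()".toList with hS
  set flat := l.flatMap (escL S) with hflat
  have hfne : flat ≠ [] := flatMap_escL_ne_nil l hne
  rw [startswith_flatMap l hne]
  have hend2 : ∀ l2 : List Char, l2 = flat ∨ l2 = '^' :: flat →
      PySem.Chars.endswith l2 ['*'] = PySem.Chars.endswith l ['*'] := by
    intro l2 h2
    rw [endswith_singleton, endswith_singleton]
    have hlast : l2.getLast? = flat.getLast? := by
      rcases h2 with h2 | h2 <;> subst h2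
      · rfl
      · exact List.getLast?_append_of_ne_nil ['^'] hfne
    rw [hlast, hflat, getLast?_flatMap_escL]
  by_cases hst : PySem.Chars.startswith l ['*'] = true
  · rw [if_pos hst, if_pos hst, hend2 flat (Or.inl rfl)]
    by_cases hend : PySem.Chars.endswith l ['*'] = true
    · rw [if_pos hend, if_pos hend]
      rw [replace_single]
      rw [show (fun ch => if ch = '*' then ['.', '*'] else [ch])
            = (fun ch => if ch = '*' then ['.', '*'] else [ch]) from rfl]
      rw [star_expand]
      simp
    · rw [if_neg hend, if_neg hend]
      rw [replace_single, List.flatMap_append, star_expand]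
      simp
  · rw [if_neg hst, if_neg hst, hend2 _ (Or.inr rfl)]
    by_cases hend : PySem.Chars.endswith l ['*'] = true
    · rw [if_pos hend, if_pos hend]
      rw [replace_single, List.flatMap_cons, star_expand]
      simp
    · rw [if_neg hend, if_neg hend]
      rw [replace_single, List.flatMap_append, List.flatMap_cons, star_expand]
      simp

-- ===== VERDICT (by name: the statement is the Claim_ definition above) =====
theorem create_regex_spec : Claim_equal_create_regex := by
  intro s _
  unfold Spec_create_regex
  by_cases h : s = ""
  · simp [create_regex, create_regex_alt, h]
  · have := main_eq s.toList (by simpa using h)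
    simpa using this
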